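-- pv_equiv track=rewrite | github.com/Taekyo-Lee/sw_expert_academy | problem_bank/25478/python/quick_test.py | compute_twin_factor
-- ===== SOURCE A (Python) =====
-- MOD = 10**9 + 7
--
-- def compute_twin_factor(A_local, n):
--     twin_key = {}
--     for i in range(n):
--         key = tuple(A_local[i][j] for j in range(n))
--         if key not in twin_key:
--             twin_key[key] = 0
--         twin_key[key] += 1
--     result = 1
--     for sz in twin_key.values():
--         for k in range(1, sz + 1):
--             result = result * k % MOD
--     return result
-- ===== SOURCE B (Python) =====
-- MOD = 10**9 + 7
--
-- def compute_twin_factor(A_local, n):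
--     rows = sorted(tuple(A_local[i][j] for j in range(n)) for i in range(n))
--     result = 1
--     run = 0
--     prev = None
--     for r in rows:
--         if prev is not None and r == prev:
--             run += 1
--         else:
--             for k in range(1, run + 1):
--                 result = result * k % MOD
--             run = 1
--         prev = r
--     for k in range(1, run + 1):
--         result = result * k % MOD
--     return result
-- ===== Notes on version B (the rewrite author's own statement) =====
-- stated objective: alternative
-- what changed: B replaces A's insertion-ordered counting dictionary by lexicographically sorting the list of row tuples and doing a single compare-to-previous run scan that multiplies in factorial(run length) mod 1e9+7 as each run ends.
import Mathlib
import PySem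

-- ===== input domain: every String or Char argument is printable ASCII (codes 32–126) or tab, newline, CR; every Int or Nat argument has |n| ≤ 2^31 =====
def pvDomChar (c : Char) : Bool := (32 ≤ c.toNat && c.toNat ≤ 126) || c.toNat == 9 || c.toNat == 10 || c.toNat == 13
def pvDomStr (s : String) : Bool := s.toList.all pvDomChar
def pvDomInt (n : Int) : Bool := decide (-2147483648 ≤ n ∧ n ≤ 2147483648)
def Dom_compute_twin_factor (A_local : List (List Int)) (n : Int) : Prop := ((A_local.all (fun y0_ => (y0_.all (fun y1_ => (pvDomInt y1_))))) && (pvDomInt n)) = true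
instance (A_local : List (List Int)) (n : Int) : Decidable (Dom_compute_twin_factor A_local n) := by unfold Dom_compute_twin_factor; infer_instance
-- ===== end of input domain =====

-- B replaces A's counting dictionary by a lexicographic sort of the row tuples followed by a single
-- compare-to-previous run scan (objective: alternative decomposition; not claimed faster).

def pvMOD : Int := 10 ^ 9 + 7

-- key = tuple(A_local[i][j] for j in range(n))  (identical line in both sources)
def pvRow (A_local : List (List Int)) (n : Int) (i : Int) : List Int :=
  (PySem.List.pyRange 0 n).map (fun j => PySem.List.pyGetD (PySem.List.pyGetD A_local i []) j 0)

-- 'for k in range(1, sz+1): result = result * k % MOD'  (identical loop in both sources)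
def pvFactLoop (res : Int) (sz : Int) : Int :=
  (PySem.List.pyRange 1 (sz + 1)).foldl (fun r k => PySem.Int.mod (r * k) pvMOD) res

-- ===== PORT A =====
def compute_twin_factor (A_local : List (List Int)) (n : Int) : Int :=
  let twin_key : PySem.Dict (List Int) Int :=
    (PySem.List.pyRange 0 n).foldl (fun d i =>
      let key := pvRow A_local n i
      let d' := if d.contains key then d else d.insert key 0
      d'.insert key (d'.getD key 0 + 1)) PySem.Dict.empty
  twin_key.values.foldl (fun result sz => pvFactLoop result sz) 1

-- ===== PORT B =====
def compute_twin_factor_alt (A_local : List (List Int)) (n : Int) : Int :=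
  let rows : List (List Int) :=
    @PySem.List.sorted (List Int) (List Int) List.instLinearOrder.toLT LinearOrder.toDecidableLT
      ((PySem.List.pyRange 0 n).map (fun i => pvRow A_local n i)) (fun x => x) false
  let s :=
    rows.foldl (fun st r =>
      if st.2.2 = some r then (st.1, st.2.1 + 1, some r)
      else (pvFactLoop st.1 st.2.1, 1, some r))
      ((1 : Int), (0 : Int), (none : Option (List Int)))
  pvFactLoop s.1 s.2.1

-- ===== PRECONDITION & SPEC =====
-- Pre_ excludes exactly the inputs on which A raises IndexError: some i < n with A_local[i]
-- missing, or some of the first n rows shorter than n.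
def Pre_compute_twin_factor (A_local : List (List Int)) (n : Int) : Prop :=
  n ≤ (A_local.length : Int) ∧ ∀ row ∈ A_local.take n.toNat, n ≤ (row.length : Int)
instance (A_local : List (List Int)) (n : Int) : Decidable (Pre_compute_twin_factor A_local n) := by
  unfold Pre_compute_twin_factor; infer_instance

def pvWitness_compute_twin_factor : List (List Int) × Int := ([[1, 2], [1, 2]], 2)

def Spec_compute_twin_factor (A_local : List (List Int)) (n : Int) (out : Int) : Prop :=
  out = compute_twin_factor_alt A_local n
instance (A_local : List (List Int)) (n : Int) (out : Int) : Decidable (Spec_compute_twin_factor A_local n out) := by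
  unfold Spec_compute_twin_factor; infer_instance

-- ===== CLAIM (what is proved, stated in full; the proofs are below) =====
def Claim_equal_compute_twin_factor : Prop := ∀ (A_local : List (List Int)) (n : Int), Dom_compute_twin_factor A_local n → Pre_compute_twin_factor A_local n → Spec_compute_twin_factor A_local n (compute_twin_factor A_local n)

-- ===== LEMMAS AND PROOFS =====

-- the list of row keys both programs build
def pvKeys (A_local : List (List Int)) (n : Int) : List (List Int) :=
  (PySem.List.pyRange 0 n).map (fun i => pvRow A_local n i)

def pvFct (sz : Int) : Int := (Nat.factorial sz.toNat : Int)

def pvFoldG (res : Int) (l : List Int) : Int := l.foldl pvFactLoop res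

def pvRunCounts : List (List Int) → List Int
  | [] => []
  | a :: t => (1 + (t.count a : Int)) :: pvRunCounts (t.filter (fun x => !(x == a)))
termination_by l => l.length
decreasing_by
  simpa using Nat.lt_succ_of_le (le_trans (List.length_filter_le _ _) (le_of_eq (List.length_attach)))

lemma pvFactLoop_zero (r : Int) : pvFactLoop r 0 = r := by
  simp [pvFactLoop, PySem.List.pyRange_one_eq_nil (by norm_num : (1:Int) ≤ 1)]

lemma pvMOD_pos : (0:Int) < pvMOD := by norm_num [pvMOD]

lemma pvFactLoop_nat (m : Nat) (r : Int) :
    pvFactLoop r (m : Int) = if m = 0 then r else PySem.Int.mod (r * (Nat.factorial m : Int)) pvMOD := by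
  induction m generalizing r with
  | zero => simpa using pvFactLoop_zero r
  | succ k ih =>
    have hsplit : PySem.List.pyRange 1 ((k:Int) + 1 + 1) =
        PySem.List.pyRange 1 ((k:Int) + 1) ++ [(k:Int) + 1] :=
      PySem.List.pyRange_one_succ_right (by omega)
    have hcast : ((k + 1 : Nat) : Int) + 1 = ((k:Int) + 1) + 1 := by push_cast; ring
    unfold pvFactLoop
    rw [hcast, hsplit, List.foldl_append]
    have hfold : (PySem.List.pyRange 1 ((k:Int) + 1)).foldl
        (fun r k => PySem.Int.mod (r * k) pvMOD) r = pvFactLoop r (k : Int) := rfl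
    rw [List.foldl_cons, List.foldl_nil, hfold, ih]
    rcases Nat.eq_zero_or_pos k with hk | hk
    · subst hk; simp [Nat.factorial]
    · have hkne : k ≠ 0 := Nat.pos_iff_ne_zero.mp hk
      have hfac : (Nat.factorial (k+1) : Int) = (Nat.factorial k : Int) * ((k:Int)+1) := by
        rw [Nat.factorial_succ]; push_cast; ring
      simp only [hkne, Nat.succ_ne_zero, if_false]
      simp only [PySem.Int.mod_eq_emod_of_pos pvMOD_pos]
      rw [Int.mul_emod, Int.emod_emod_of_dvd _ dvd_rfl, ← Int.mul_emod, hfac]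
      ring_nf

lemma pvFactLoop_pos (sz : Int) (hsz : 1 ≤ sz) (r : Int) :
    pvFactLoop r sz = PySem.Int.mod (r * pvFct sz) pvMOD := by
  have h : sz = (sz.toNat : Int) := by omega
  have hne : sz.toNat ≠ 0 := by omega
  rw [h, pvFactLoop_nat, if_neg hne]
  rfl

lemma pvFoldG_eq (l : List Int) (h : ∀ x ∈ l, 1 ≤ x) (r : Int) :
    pvFoldG r l = if l = [] then r else PySem.Int.mod (r * (l.map pvFct).prod) pvMOD := by
  induction l generalizing r with
  | nil => simp [pvFoldG]
  | cons a t ih =>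
    have ha : (1:Int) ≤ a := h a (by simp)
    have hstep : pvFoldG r (a :: t) = pvFoldG (pvFactLoop r a) t := rfl
    rw [hstep, ih (fun x hx => h x (by simp [hx])), pvFactLoop_pos a ha]
    rcases eq_or_ne t [] with ht | ht
    · subst ht; simp
    · simp only [ht, if_false, List.cons_ne_nil, List.map_cons, List.prod_cons]
      rw [PySem.Int.mod_eq_emod_of_pos pvMOD_pos, PySem.Int.mod_eq_emod_of_pos pvMOD_pos,
        PySem.Int.mod_eq_emod_of_pos pvMOD_pos]
      rw [Int.mul_emod, Int.emod_emod_of_dvd _ dvd_rfl, ← Int.mul_emod]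
      ring_nf

-- ---- A-side characterisation ----

lemma pvStepA (A_local : List (List Int)) (n : Int) (d : PySem.Dict (List Int) Int) (i : Int) :
    (let key := pvRow A_local n i
     let d' := if d.contains key then d else d.insert key 0
     d'.insert key (d'.getD key 0 + 1)) =
    d.insert (pvRow A_local n i) (d.getD (pvRow A_local n i) 0 + 1) := by
  by_cases hc : d.contains (pvRow A_local n i)
  · simp [hc]
  · simp only [hc, Bool.false_eq_true, if_false]
    rw [PySem.Dict.getD_insert_self, PySem.Dict.insert_insert_self,
      PySem.Dict.getD_of_not_contains d 0 (by simpa using hc)]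

lemma pvDictA (A_local : List (List Int)) (n : Int) :
    ∀ (l : List Int) (d : PySem.Dict (List Int) Int),
      l.foldl (fun d i =>
        let key := pvRow A_local n i
        let d' := if d.contains key then d else d.insert key 0
        d'.insert key (d'.getD key 0 + 1)) d =
      (l.map (fun i => pvRow A_local n i)).foldl
        (fun d k => d.insert k (d.getD k 0 + 1)) d := by
  intro l
  induction l with
  | nil => intro d; rfl
  | cons i t ih =>
    intro d
    simp only [List.foldl_cons, List.map_cons]
    rw [pvStepA, ih]

lemma pvA_eq (A_local : List (List Int)) (n : Int) :
    compute_twin_factor A_local n =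
      pvFoldG 1 ((PySem.Set.ofList (pvKeys A_local n)).map
        (fun k => ((pvKeys A_local n).count k : Int))) := by
  unfold compute_twin_factor
  rw [pvDictA, PySem.Dict.foldl_insert_getD_add_one_eq_counter]
  have hv : (PySem.Dict.counter (pvKeys A_local n)).values =
      (PySem.Set.ofList (pvKeys A_local n)).map (fun k => ((pvKeys A_local n).count k : Int)) := by
    rw [PySem.Dict.values_eq_map_keys _ (PySem.Dict.nodup_keys_counter _) 0,
      PySem.Dict.keys_counter]
    exact List.map_congr_left (fun k _ => PySem.Dict.getD_counter _ k)
  show List.foldl (fun result sz => pvFactLoop result sz) 1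
      (PySem.Dict.counter (pvKeys A_local n)).values = _
  rw [hv]
  rfl

-- ---- PySem.Set.ofList structure ----

lemma pvFoldlAdd_skip {α : Type} [BEq α] [LawfulBEq α] (a : α) :
    ∀ (t : List α) (s : PySem.Set α), a ∈ s →
      t.foldl PySem.Set.add s = (t.filter (fun x => !(x == a))).foldl PySem.Set.add s := by
  intro t
  induction t with
  | nil => intro s _; rfl
  | cons x t ih =>
    intro s hs
    by_cases hx : x = a
    · subst hx
      have : PySem.Set.add s x = s := by
        simp [PySem.Set.add, PySem.Set.contains, hs]
      simp only [List.foldl_cons, List.filter_cons, beq_self_eq_true, Bool.not_true,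
        Bool.false_eq_true, if_false, this]
      exact ih s hs
    · have hmem : a ∈ PySem.Set.add s x := (PySem.Set.mem_add s x a).mpr (Or.inl hs)
      simp only [List.foldl_cons, List.filter_cons, Bool.not_eq_eq_eq_not, Bool.not_true]
      rw [if_pos (by simpa using hx)]
      rw [List.foldl_cons]
      exact ih _ hmem

lemma pvFoldlAdd_cons {α : Type} [BEq α] [LawfulBEq α] (a : α) :
    ∀ (l : List α) (s : List α), (∀ x ∈ l, (x == a) = false) →
      l.foldl PySem.Set.add (a :: s) = a :: l.foldl PySem.Set.add s := by
  intro l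
  induction l with
  | nil => intro s _; rfl
  | cons x t ih =>
    intro s hl
    have hxa : (x == a) = false := hl x (by simp)
    have hadd : PySem.Set.add (a :: s) x = a :: PySem.Set.add s x := by
      simp only [PySem.Set.add, PySem.Set.contains, List.contains_cons, hxa, Bool.false_or,
        List.cons_append]
      split_ifs <;> rfl
    rw [List.foldl_cons, hadd, List.foldl_cons]
    exact ih _ (fun y hy => hl y (by simp [hy]))

lemma pvOfList_cons_filter {α : Type} [BEq α] [LawfulBEq α] (a : α) (t : List α) :
    PySem.Set.ofList (a :: t) = a :: PySem.Set.ofList (t.filter (fun x => !(x == a))) := by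
  have h0 : PySem.Set.ofList (a :: t) = t.foldl PySem.Set.add [a] := by
    simp [PySem.Set.ofList, PySem.Set.add, PySem.Set.contains, PySem.Set.empty]
  rw [h0, pvFoldlAdd_skip a t [a] (by simp)]
  exact pvFoldlAdd_cons a _ [] (fun x hx => by
    have := List.of_mem_filter hx
    simpa using this)

lemma pvRunCounts_eq : ∀ (ys : List (List Int)),
    pvRunCounts ys = (PySem.Set.ofList ys).map (fun k => (ys.count k : Int)) := by
  intro ys
  induction hl : ys.length using Nat.strong_induction_on generalizing ys with
  | _ m ih =>
    cases ys with
    | nil => simp [pvRunCounts, PySem.Set.ofList, PySem.Set.empty]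
    | cons a t =>
      rw [pvRunCounts, pvOfList_cons_filter, List.map_cons]
      have hlt : (t.filter (fun x => !(x == a))).length < m := by
        subst hl
        simpa using Nat.lt_succ_of_le (List.length_filter_le _ _)
      rw [ih _ hlt _ rfl, List.count_cons_self]
      congr 1
      · push_cast; ring
      · apply List.map_congr_left
        intro k hk
        have hkf : k ∈ t.filter (fun x => !(x == a)) := (PySem.Set.mem_ofList _ k).mp hk
        have hka : k ≠ a := by
          have := List.of_mem_filter hkf
          simpa using this
        have h1 : (a :: t).count k = t.count k := List.count_cons_of_ne (fun h => hka h.symm)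
        have h2 : (t.filter (fun x => !(x == a))).count k = t.count k :=
          List.count_filter (by simpa using hka)
        rw [h1, h2]

-- ---- B-side characterisation ----

def pvScanStep (st : Int × Int × Option (List Int)) (r : List Int) : Int × Int × Option (List Int) :=
  if st.2.2 = some r then (st.1, st.2.1 + 1, some r)
  else (pvFactLoop st.1 st.2.1, 1, some r)

lemma pvScan_go : ∀ (ys : List (List Int)), ys.Pairwise (· ≤ ·) →
    ∀ (res run : Int) (b : List Int), (∀ y ∈ ys, b ≤ y) →
      (fun s => pvFactLoop s.1 s.2.1) (ys.foldl pvScanStep (res, run, some b)) =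
        pvFoldG (pvFactLoop res (run + (ys.count b : Int)))
          (pvRunCounts (ys.filter (fun x => !(x == b)))) := by
  intro ys
  induction ys with
  | nil => intro _ res run b _; simp [pvFoldG, pvRunCounts]
  | cons a t ih =>
    intro hpw res run b hb
    have hta : ∀ y ∈ t, a ≤ y := fun y hy => (List.pairwise_cons.mp hpw).1 y hy
    have htp : t.Pairwise (· ≤ ·) := (List.pairwise_cons.mp hpw).2
    by_cases hba : b = a
    · subst hba
      have hstep : pvScanStep (res, run, some b) b = (res, run + 1, some b) := by
        simp [pvScanStep]
      rw [List.foldl_cons, hstep, ih htp res (run + 1) b hta]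
      have hc : ((b :: t).count b : Int) = (t.count b : Int) + 1 := by
        rw [List.count_cons_self]; push_cast; ring
      have hf : (b :: t).filter (fun x => !(x == b)) = t.filter (fun x => !(x == b)) := by
        simp
      rw [hc, hf]
      congr 2
      ring
    · have hstep : pvScanStep (res, run, some b) a = (pvFactLoop res run, 1, some a) := by
        simp [pvScanStep, fun h : b = a => hba h]
      have hbt : b ∉ t := by
        intro hmem
        exact hba (le_antisymm (hb a (by simp)) (hta b hmem))
      have hbnot : b ∉ a :: t := by
        intro hmem
        rcases List.mem_cons.mp hmem with h | h
        · exact hba h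
        · exact hbt h
      have hc0 : (a :: t).count b = 0 := List.count_eq_zero.mpr hbnot
      have hfs : (a :: t).filter (fun x => !(x == b)) = a :: t :=
        List.filter_eq_self.mpr (fun x hx => by
          have hxb : x ≠ b := fun h => hbnot (h ▸ hx)
          simp [hxb])
      rw [List.foldl_cons, hstep, ih htp (pvFactLoop res run) 1 a hta, hc0, hfs]
      rw [pvRunCounts]
      have : pvFoldG (pvFactLoop res (run + (0:Nat)))
          ((1 + (t.count a : Int)) :: pvRunCounts (t.filter (fun x => !(x == a)))) =
          pvFoldG (pvFactLoop (pvFactLoop res (run + (0:Nat))) (1 + (t.count a : Int)))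
          (pvRunCounts (t.filter (fun x => !(x == a)))) := rfl
      rw [this]
      norm_num

lemma pvB_eq (A_local : List (List Int)) (n : Int) :
    compute_twin_factor_alt A_local n =
      pvFoldG 1 (pvRunCounts
        (@PySem.List.sorted (List Int) (List Int) List.instLinearOrder.toLT LinearOrder.toDecidableLT
          (pvKeys A_local n) (fun x => x) false)) := by
  unfold compute_twin_factor_alt
  have hkeys : ((PySem.List.pyRange 0 n).map (fun i => pvRow A_local n i)) = pvKeys A_local n := rfl
  rw [hkeys]
  set ys := @PySem.List.sorted (List Int) (List Int) List.instLinearOrder.toLT LinearOrder.toDecidableLT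
    (pvKeys A_local n) (fun x => x) false with hys
  have hpw : ys.Pairwise (· ≤ ·) := by
    rw [hys]; exact PySem.List.sorted_pairwise (pvKeys A_local n) (fun x => x)
  have hbody : (fun (st : Int × Int × Option (List Int)) (r : List Int) =>
      if st.2.2 = some r then (st.1, st.2.1 + 1, some r)
      else (pvFactLoop st.1 st.2.1, 1, some r)) = pvScanStep := by
    funext st r; rfl
  rw [hbody]
  show pvFactLoop (List.foldl pvScanStep ((1:Int), (0:Int), (none : Option (List Int))) ys).1
      (List.foldl pvScanStep ((1:Int), (0:Int), (none : Option (List Int))) ys).2.1 =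
    pvFoldG 1 (pvRunCounts ys)
  cases hy : ys with
  | nil => simp [pvRunCounts, pvFoldG, pvFactLoop_zero]
  | cons a t =>
    rw [hy] at hpw
    have hta : ∀ y ∈ t, a ≤ y := fun y hyy => (List.pairwise_cons.mp hpw).1 y hyy
    have htp : t.Pairwise (· ≤ ·) := (List.pairwise_cons.mp hpw).2
    have hstep : pvScanStep ((1:Int), (0:Int), (none : Option (List Int))) a =
        (pvFactLoop 1 0, 1, some a) := by
      simp [pvScanStep]
    rw [List.foldl_cons, hstep, pvFactLoop_zero]
    have := pvScan_go t htp 1 1 a hta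
    simp only at this
    rw [this, pvRunCounts]
    rfl

-- ---- assembling both sides ----

theorem pv_main (A_local : List (List Int)) (n : Int) :
    compute_twin_factor A_local n = compute_twin_factor_alt A_local n := by
  set keys := pvKeys A_local n with hkeys
  set ys := @PySem.List.sorted (List Int) (List Int) List.instLinearOrder.toLT LinearOrder.toDecidableLT
    keys (fun x => x) false with hys
  have hperm_keys : ys.Perm keys :=
    @PySem.List.sorted_perm (List Int) (List Int) List.instLinearOrder.toLT
      LinearOrder.toDecidableLT keys (fun x => x) false
  have hLB : pvRunCounts ys = (PySem.Set.ofList ys).map (fun k => (keys.count k : Int)) := by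
    rw [pvRunCounts_eq]
    exact List.map_congr_left (fun k _ => by rw [hperm_keys.count_eq k])
  have hsetperm : (PySem.Set.ofList ys).Perm (PySem.Set.ofList keys) := by
    rw [List.perm_ext_iff_of_nodup (PySem.Set.nodup_ofList ys) (PySem.Set.nodup_ofList keys)]
    intro k
    rw [PySem.Set.mem_ofList, PySem.Set.mem_ofList]
    exact hperm_keys.mem_iff
  have hlistperm : (pvRunCounts ys).Perm ((PySem.Set.ofList keys).map (fun k => (keys.count k : Int))) := by
    rw [hLB]; exact hsetperm.map _
  have hposA : ∀ x ∈ (PySem.Set.ofList keys).map (fun k => (keys.count k : Int)), (1:Int) ≤ x := by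
    intro x hx
    rcases List.mem_map.mp hx with ⟨k, hk, hkx⟩
    have hmem : k ∈ keys := (PySem.Set.mem_ofList keys k).mp hk
    have : 0 < keys.count k := List.count_pos_iff.mpr hmem
    omega
  have hposB : ∀ x ∈ pvRunCounts ys, (1:Int) ≤ x := fun x hx => hposA x (hlistperm.mem_iff.mp hx)
  rw [pvA_eq, pvB_eq]
  rw [pvFoldG_eq _ hposA, pvFoldG_eq _ hposB]
  rcases eq_or_ne ((PySem.Set.ofList keys).map (fun k => (keys.count k : Int))) [] with hA | hA
  · have hB0 : pvRunCounts ys = [] := List.perm_nil.mp (hA ▸ hlistperm)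
    rw [hA, hB0]
  · have hB : pvRunCounts ys ≠ [] := by
      intro h
      rw [h] at hlistperm
      exact hA (List.perm_nil.mp hlistperm.symm)
    rw [if_neg hA, if_neg hB]
    have hpr : (List.map pvFct (pvRunCounts ys)).prod =
        (List.map pvFct ((PySem.Set.ofList keys).map (fun k => (keys.count k : Int)))).prod :=
      (hlistperm.map pvFct).prod_eq
    rw [hpr]

-- ===== VERDICT (by name: the statement is the Claim_ definition above) =====
theorem compute_twin_factor_spec : Claim_equal_compute_twin_factor := by
  intro A_local n _ _
  unfold Spec_compute_twin_factor
  exact pv_main A_local n
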